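-- pv_equiv track=rewrite | github.com/kitaharalab/4hands_piano_arrangement | Automatic_Piano_Duet_Arrangement_for_Ensemble_Scores.py | createOnePhrase
-- ===== SOURCE A (Python) =====
-- import collections
--
-- def flatten(l):
--   for el in l:
--     if isinstance(el, collections.abc.Iterable) and not isinstance(el, (str, bytes)):
--       yield from flatten(el)
--     else:
--       yield el
--
-- def getChord(in_note_num):  # 1回に弾く音符（和音のときもある） in_note_num: [[], [], [], ...]
--   note_num = list(flatten(in_note_num))
--   ans_notes = [-1]
--   if max(note_num) >= 0:
--     notes = []
--     temp_notes = [n for n in note_num if n >= 0]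
--     temp_notes = list(set(temp_notes))
--     ## 1オクターブ未満に収まるようにする
--     for n in temp_notes:
--       while max(temp_notes) - n > 12 -1:  # 1オクターブに収まるまで繰り返す
--         n += 12
--       notes.append(n)
--     notes = sorted(list(set(notes)), reverse=True)
--     ## n和音以上の時に3和音にする
--     if len(notes) <= 3:  # 何音以内か
--       ans_notes = notes
--     else:
--       cur_note = notes[0]
--       ans_notes = [cur_note]
--       for nn in notes:
--         if 3 <= cur_note - nn <= 6:
--           ans_notes.append(nn)
--           cur_note = nn
--         if len(ans_notes) >= 3: break
--   return ans_notes
--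
-- def createOnePhrase(all_note_n):  # 1フレーズ（1パートのみ）のノートナンバーを返す
--   fhrase_nn = []
--   for i in range(len(all_note_n[0])):
--     chord_nn = []
--     for j in range(len(all_note_n)):
--       chord_nn.append(all_note_n[j][i])
--     fhrase_nn.append(getChord(chord_nn))
--   return fhrase_nn
-- ===== SOURCE B (Python) =====
-- def _pick(cur, rest, k):
--     # first k notes continuing the chain, each 3..6 below the previous picked note
--     if k == 0 or not rest:
--         return []
--     nn, tail = rest[0], rest[1:]
--     if 3 <= cur - nn <= 6:
--         return [nn] + _pick(nn, tail, k - 1)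
--     return _pick(cur, tail, k)
--
-- def _chord(col):
--     nonneg = [n for ns in col for n in ns if n >= 0]
--     if not nonneg:
--         return [-1]
--     m = max(nonneg)
--     # fold each note up by whole octaves so it lies within 11 of the maximum (closed form)
--     notes = sorted({m - (m - n) % 12 for n in nonneg}, reverse=True)
--     if len(notes) <= 3:
--         return notes
--     return [notes[0]] + _pick(notes[0], notes[1:], 2)
--
-- def createOnePhrase(all_note_n):
--     return [_chord(col) for col in zip(*all_note_n)]
-- ===== Notes on version B (the rewrite author's own statement) =====
-- stated objective: simpler
-- what changed: getChord's octave-folding while-loop (which re-evaluates max(temp_notes) on every iteration) is replaced by the closed form m-(m-n)%12, its filter/set/append passes collapse into one comprehension plus one sorted-set expression, the 3-note selection loop with break becomes a small recursive picker, and createOnePhrase's index-based double loop becomes a map over zip(*all_note_n).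
-- outside the precondition, e.g. on createOnePhrase([]): A raises IndexError, B returns []
import Mathlib
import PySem

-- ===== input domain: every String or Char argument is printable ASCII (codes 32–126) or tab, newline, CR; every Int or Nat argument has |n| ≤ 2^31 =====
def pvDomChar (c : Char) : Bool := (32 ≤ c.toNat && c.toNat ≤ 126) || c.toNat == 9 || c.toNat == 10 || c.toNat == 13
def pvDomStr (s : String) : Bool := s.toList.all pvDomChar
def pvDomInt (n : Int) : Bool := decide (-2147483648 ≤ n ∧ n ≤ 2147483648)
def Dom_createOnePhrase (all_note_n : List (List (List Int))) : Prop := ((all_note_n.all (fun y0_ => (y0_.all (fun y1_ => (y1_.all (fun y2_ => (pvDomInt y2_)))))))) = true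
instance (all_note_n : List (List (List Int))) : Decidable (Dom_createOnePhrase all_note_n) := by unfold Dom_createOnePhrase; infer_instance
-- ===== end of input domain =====

-- B replaces A's octave-folding while-loop by the closed form m-(m-n)%12, fuses the set/filter
-- passes into one sorted-set expression, turns the break-loop 3-note selection into a recursive
-- picker and the index-based double loop into a map over zip(*all_note_n); objective: simpler.


-- ===== PORT A =====

-- the 'while max(temp_notes) - n > 12 - 1: n += 12' loop (max is constant during the loop)
def pvFoldUpA (m n : Int) : Int :=
  if m - n > 11 then pvFoldUpA m (n + 12) else n
termination_by (m - n).toNat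
decreasing_by omega

-- the for-loop over notes with 'break': state is (ans_notes, cur_note)
def pvSelectA : List Int → List Int → Int → List Int
  | [], ans, _ => ans
  | nn :: rest, ans, cur =>
    let ans' := if 3 ≤ cur - nn ∧ cur - nn ≤ 6 then ans ++ [nn] else ans
    let cur' := if 3 ≤ cur - nn ∧ cur - nn ≤ 6 then nn else cur
    if ans'.length ≥ 3 then ans' else pvSelectA rest ans' cur'

def getChordA (in_note_num : List (List Int)) : List Int :=
  -- flatten(in_note_num): the elements are lists of ints, so it yields their concatenation
  let note_num := in_note_num.flatten
  -- max(note_num) raises ValueError on an empty list: Pre_ excludes that, the -1 default is unreachable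
  let mx := (PySem.List.max? note_num (fun x => x)).getD (-1)
  if mx ≥ 0 then
    -- temp_notes = list(set([n for n in note_num if n >= 0])); CPython's set order is not modelled,
    -- but the result is consumed only through sorted(set(..)), which is order-independent
    let temp_notes := PySem.Set.ofList (note_num.filter (fun n => decide (n ≥ 0)))
    let tmax := (PySem.List.max? temp_notes (fun x => x)).getD (-1)
    let notes := temp_notes.foldl (fun acc n => acc ++ [pvFoldUpA tmax n]) []
    let notes := PySem.List.sorted (PySem.Set.ofList notes) (fun x => x) true
    if notes.length ≤ 3 then notes
    else pvSelectA notes [notes.headD 0] (notes.headD 0)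
  else [-1]

def createOnePhrase (all_note_n : List (List (List Int))) : List (List Int) :=
  -- all_note_n[0] raises IndexError on []: Pre_ excludes that, headD default unreachable
  let part0 := all_note_n.headD []
  (List.range part0.length).foldl (fun acc i =>
    -- all_note_n[j][i]: Pre_ keeps i in range for every part, so getD's default is unreachable
    let chord_nn := all_note_n.foldl (fun c part => c ++ [part.getD i []]) []
    acc ++ [getChordA chord_nn]) []

-- ===== PORT B =====

def pvPickB : Int → List Int → Nat → List Int
  | _, _, 0 => []
  | _, [], _ + 1 => []
  | cur, nn :: tail, k + 1 =>
    if 3 ≤ cur - nn ∧ cur - nn ≤ 6 then nn :: pvPickB nn tail k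
    else pvPickB cur tail (k + 1)

def pvChordB (col : List (List Int)) : List Int :=
  let nonneg := col.flatten.filter (fun n => decide (n ≥ 0))
  if nonneg = [] then [-1]
  else
    -- nonneg ≠ [], so max? is some; getD default unreachable
    let m := (PySem.List.max? nonneg (fun x => x)).getD 0
    let notes := PySem.List.sorted
      (PySem.Set.ofList (nonneg.map (fun n => m - PySem.Int.mod (m - n) 12))) (fun x => x) true
    if notes.length ≤ 3 then notes
    else notes.headD 0 :: pvPickB (notes.headD 0) notes.tail 2

-- zip(*all_note_n): columns up to the shortest part (recursion on the first part;
-- stops as soon as any part is exhausted, like zip)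
def pvZipGo : List (List Int) → List (List (List Int)) → List (List (List Int))
  | [], _ => []
  | x :: xs, ps =>
    if ps.any (·.isEmpty) then []
    else (x :: ps.map (·.headD [])) :: pvZipGo xs (ps.map (·.tail))

def pvZipCols (parts : List (List (List Int))) : List (List (List Int)) :=
  match parts with
  | [] => []
  | p :: ps => pvZipGo p ps

def createOnePhrase_alt (all_note_n : List (List (List Int))) : List (List Int) :=
  (pvZipCols all_note_n).map pvChordB

-- ===== PRECONDITION & SPEC =====
-- Pre_ = exactly the inputs where A returns: a nonempty part list, no part shorter than part 0
-- (else all_note_n[j][i] raises IndexError; all_note_n = [] raises on all_note_n[0]),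
-- and every time step containing at least one note (else max([]) raises ValueError).
def Pre_createOnePhrase (all_note_n : List (List (List Int))) : Prop :=
  all_note_n ≠ [] ∧
  (∀ part ∈ all_note_n, (all_note_n.headD []).length ≤ part.length) ∧
  (∀ i < (all_note_n.headD []).length,
     (all_note_n.map (fun part => part.getD i [])).flatten ≠ [])
instance (all_note_n : List (List (List Int))) : Decidable (Pre_createOnePhrase all_note_n) := by
  unfold Pre_createOnePhrase; infer_instance

def pvWitness_createOnePhrase : List (List (List Int)) := [[[60, 64], [62]], [[48], []]]

def Spec_createOnePhrase (all_note_n : List (List (List Int))) (out : List (List Int)) : Prop := out = createOnePhrase_alt all_note_n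
instance (all_note_n : List (List (List Int))) (out : List (List Int)) : Decidable (Spec_createOnePhrase all_note_n out) := by unfold Spec_createOnePhrase; infer_instance

-- ===== CLAIM (what is proved, stated in full; the proofs are below) =====
def Claim_equal_createOnePhrase : Prop := ∀ (all_note_n : List (List (List Int))), Dom_createOnePhrase all_note_n → Pre_createOnePhrase all_note_n → Spec_createOnePhrase all_note_n (createOnePhrase all_note_n)

-- ===== LEMMAS AND PROOFS =====

theorem foldUpA_eq (m n : Int) (h : 0 ≤ m - n) :
    pvFoldUpA m n = m - PySem.Int.mod (m - n) 12 := by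
  rw [pvFoldUpA]
  split
  · rename_i hgt
    rw [foldUpA_eq m (n + 12) (by omega)]
    have h12 : (0:Int) < 12 := by omega
    rw [PySem.Int.mod_eq_emod_of_pos h12, PySem.Int.mod_eq_emod_of_pos h12]
    have : m - (n + 12) = (m - n) + (-1) * 12 := by ring
    rw [this, Int.add_mul_emod_self_right]
  · rename_i hle
    rw [PySem.Int.mod_eq_emod_of_pos (by omega)]
    rw [Int.emod_eq_of_lt h (by omega)]
    ring
termination_by (m - n).toNat
decreasing_by omega

theorem select2_eq (t : List Int) (a b c : Int) :
    pvSelectA t [a, b] c = a :: b :: pvPickB c t 1 := by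
  induction t generalizing c with
  | nil => simp [pvSelectA, pvPickB]
  | cons nn r ih =>
    by_cases hc : 3 ≤ c - nn ∧ c - nn ≤ 6
    · simp only [pvSelectA, pvPickB, if_pos hc]; simp
    · simp only [pvSelectA, pvPickB, if_neg hc]; simpa using ih c

theorem select1_eq (t : List Int) (a c : Int) :
    pvSelectA t [a] c = a :: pvPickB c t 2 := by
  induction t generalizing c with
  | nil => simp [pvSelectA, pvPickB]
  | cons nn r ih =>
    by_cases hc : 3 ≤ c - nn ∧ c - nn ≤ 6
    · simp only [pvSelectA, pvPickB, if_pos hc]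
      simpa using select2_eq r a nn nn
    · simp only [pvSelectA, pvPickB, if_neg hc]; simpa using ih c

theorem selhead_eq (c : Int) (t : List Int) :
    pvSelectA (c :: t) [c] c = c :: pvPickB c t 2 := by
  have hc : ¬(3 ≤ c - c ∧ c - c ≤ 6) := by omega
  simp only [pvSelectA, if_neg hc]
  rw [if_neg (by simp), select1_eq]

theorem chord_eq (col : List (List Int)) (h : col.flatten ≠ []) :
    getChordA col = pvChordB col := by
  obtain ⟨mx, hmx⟩ : ∃ mx, PySem.List.max? col.flatten (fun x => x) = some mx := by
    cases hm : PySem.List.max? col.flatten (fun x => x) with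
    | none => exact absurd ((PySem.List.max?_eq_none_iff _ _).mp hm) h
    | some v => exact ⟨v, rfl⟩
  have hmem := PySem.List.max?_mem hmx
  have hmax := PySem.List.max?_isMax hmx
  by_cases hge : mx ≥ 0
  · -- nonneg nonempty
    set nonneg := col.flatten.filter (fun n => decide (n ≥ 0)) with hnn
    have hfil : nonneg ≠ [] := by
      intro he
      have : mx ∈ nonneg := by
        rw [hnn, List.mem_filter]; exact ⟨hmem, by simpa using hge⟩
      rw [he] at this; simp at this
    obtain ⟨m, hm⟩ : ∃ m, PySem.List.max? nonneg (fun x => x) = some m := by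
      cases hm2 : PySem.List.max? nonneg (fun x => x) with
      | none => exact absurd ((PySem.List.max?_eq_none_iff _ _).mp hm2) hfil
      | some v => exact ⟨v, rfl⟩
    have hmmem := PySem.List.max?_mem hm
    have hmmax := PySem.List.max?_isMax hm
    obtain ⟨tm, htm⟩ : ∃ tm, PySem.List.max? (PySem.Set.ofList nonneg) (fun x => x) = some tm := by
      cases hm3 : PySem.List.max? (PySem.Set.ofList nonneg) (fun x => x) with
      | none =>
        have := (PySem.List.max?_eq_none_iff _ _).mp hm3
        rcases List.exists_mem_of_ne_nil _ hfil with ⟨y, hy⟩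
        have : y ∈ PySem.Set.ofList nonneg := (PySem.Set.mem_ofList _ _).mpr hy
        rw [‹PySem.Set.ofList nonneg = []›] at this; simp at this
      | some v => exact ⟨v, rfl⟩
    have htmem : tm ∈ nonneg := (PySem.Set.mem_ofList _ _).mp (PySem.List.max?_mem htm)
    have htmax := PySem.List.max?_isMax htm
    have htm_eq : tm = m := by
      have h1 : tm ≤ m := hmmax tm htmem
      have h2 : m ≤ tm := htmax m ((PySem.Set.mem_ofList _ _).mpr hmmem)
      omega
    -- unfold both sides
    rw [getChordA, pvChordB]
    simp only [← hnn, hmx, Option.getD_some, if_pos hge, if_neg hfil, hm, htm, htm_eq]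
    -- A's foldl is a map
    rw [PySem.List.foldl_append_singleton_eq_map]
    simp only [List.nil_append]
    have hmapeq : (PySem.Set.ofList nonneg).map (fun n => pvFoldUpA m n)
        = (PySem.Set.ofList nonneg).map (fun n => m - PySem.Int.mod (m - n) 12) := by
      apply List.map_congr_left
      intro n hn
      have : n ≤ m := hmmax n ((PySem.Set.mem_ofList _ _).mp hn)
      exact foldUpA_eq m n (by omega)
    rw [hmapeq]
    -- the two sorted sets are equal
    set g : Int → Int := fun n => m - PySem.Int.mod (m - n) 12 with hg
    set T := PySem.List.sorted (PySem.Set.ofList (nonneg.map g)) (fun x : Int => x) true with hT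
    have hTnd : T.Nodup := by
      rw [hT]
      exact (PySem.List.sorted_perm _ _ _).symm.nodup (PySem.Set.nodup_ofList _)
    have hTgt : T.Pairwise (· > ·) := by
      have h1 : T.Pairwise (fun a b => b ≤ a) := PySem.List.sorted_pairwise_rev _ _
      have h2 : T.Pairwise (· ≠ ·) := hTnd
      exact (h1.and h2).imp (by intro a b hab; omega)
    have hperm : T.Perm (PySem.Set.ofList ((PySem.Set.ofList nonneg).map g)) := by
      refine (PySem.List.sorted_perm _ _ _).trans ?_
      rw [List.perm_ext_iff_of_nodup (PySem.Set.nodup_ofList _) (PySem.Set.nodup_ofList _)]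
      intro a
      rw [PySem.Set.mem_ofList, PySem.Set.mem_ofList, List.mem_map, List.mem_map]
      constructor
      · rintro ⟨n, hn, rfl⟩; exact ⟨n, (PySem.Set.mem_ofList _ _).mpr hn, rfl⟩
      · rintro ⟨n, hn, rfl⟩; exact ⟨n, (PySem.Set.mem_ofList _ _).mp hn, rfl⟩
    have hsorted : PySem.List.sorted (PySem.Set.ofList ((PySem.Set.ofList nonneg).map g)) (fun x : Int => x) true = T :=
      PySem.List.sorted_rev_eq_of_perm_of_pairwise_gt _ _ _ hperm (by simpa [gt_iff_lt] using hTgt)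
    rw [hsorted]
    clear_value T
    -- final branch
    by_cases hlen : T.length ≤ 3
    · rw [if_pos hlen, if_pos hlen]
    · rw [if_neg hlen, if_neg hlen]
      cases T with
      | nil => simp at hlen
      | cons c t => simpa using selhead_eq c t
  · -- max < 0: no nonnegative notes
    have hfil : col.flatten.filter (fun n => decide (n ≥ 0)) = [] := by
      rw [List.filter_eq_nil_iff]
      intro n hn
      have := hmax n hn
      simp only [decide_eq_true_eq]
      omega
    rw [getChordA, pvChordB]
    simp only [hmx, Option.getD_some, if_neg hge, hfil]
    simp

theorem getD_tail (l : List (List Int)) (i : Nat) :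
    l.tail.getD i [] = l.getD (i+1) [] := by
  cases l <;> simp [List.getD]

theorem headD_getD (l : List (List Int)) : l.headD [] = l.getD 0 [] := by
  cases l <;> simp [List.getD]

theorem zipGo_eq (p : List (List Int)) (ps : List (List (List Int)))
    (h : ∀ part ∈ ps, p.length ≤ part.length) :
    pvZipGo p ps =
      (List.range p.length).map (fun i => (p :: ps).map (fun part => part.getD i [])) := by
  induction p generalizing ps with
  | nil => simp [pvZipGo]
  | cons x xs ih =>
    rw [pvZipGo]
    have hne : (ps.any (·.isEmpty)) = false := by
      simp only [List.any_eq_false]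
      intro part hp
      have hlen := h part hp
      simp only [List.length_cons] at hlen
      cases part
      · simp at hlen
      · simp
    rw [if_neg (by simp [hne])]
    have h' : ∀ part ∈ ps.map (·.tail), xs.length ≤ part.length := by
      intro part hp
      rcases List.mem_map.mp hp with ⟨q, hq, rfl⟩
      have := h q hq
      simp only [List.length_cons] at this
      cases q <;> simp at this ⊢ <;> omega
    rw [ih (ps.map (·.tail)) h']
    rw [List.length_cons, List.range_succ_eq_map]
    conv_rhs => rw [List.map_cons, List.map_map]
    congr 1
    · simp only [List.map_cons, List.getD_cons_zero]
      congr 1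
      exact List.map_congr_left (fun part _ => headD_getD part)
    · apply List.map_congr_left
      intro i _
      simp only [Function.comp_apply, List.map_cons, List.map_map, List.getD_cons_succ]
      congr 1
      apply List.map_congr_left
      intro part _
      exact getD_tail part i

theorem createOnePhrase_spec : Claim_equal_createOnePhrase := by
  intro a hdom hpre
  obtain ⟨hne, hlen, hcol⟩ := hpre
  unfold Spec_createOnePhrase
  cases a with
  | nil => exact absurd rfl hne
  | cons p ps =>
    rw [createOnePhrase, createOnePhrase_alt, pvZipCols]
    rw [PySem.List.foldl_append_singleton_eq_map]
    simp only [List.nil_append, List.headD_cons]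
    rw [zipGo_eq p ps (by intro part hp; simpa using hlen part (List.mem_cons_of_mem _ hp))]
    rw [List.map_map]
    apply List.map_congr_left
    intro i hi
    simp only [Function.comp_apply]
    rw [PySem.List.foldl_append_singleton_eq_map]
    simp only [List.nil_append]
    have hflat : ((p :: ps).map (fun part => part.getD i [])).flatten ≠ [] := by
      apply hcol
      simpa using List.mem_range.mp hi
    exact chord_eq _ hflat
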